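-- pv_equiv track=rewrite | github.com/CrowdStrike/tsv-data-analytics | python-packages/core/src/omigo_core/utils.py | __gen_comb4__
-- ===== SOURCE A (Python) =====
-- def __gen_comb4__(n):
--    result = []
--    for i4 in range(0, n-3):
--        for i3 in range(i4+1, n-2):
--            for i2 in range(i3+1, n-1):
--                for i1 in range(i2+1, n):
--                    result.append([i4, i3, i2, i1])
--    return result
-- ===== SOURCE B (Python) =====
-- def __gen_comb4__(n):
--     result = []
--
--     def choose(start, k, current):
--         if k == 0:
--             result.append(list(current))
--             return
--         for idx in range(start, n - k + 1):
--             choose(idx + 1, k - 1, current + [idx])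
--
--     choose(0, 4, [])
--     return result
-- ===== Notes on version B (the rewrite author's own statement) =====
-- stated objective: alternative
-- what changed: Replaces the fixed four-level nested loops with a single recursive choose(start, k, current) helper generalized over the remaining combination size k, collecting each completed combination when k reaches zero.
import Mathlib
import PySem

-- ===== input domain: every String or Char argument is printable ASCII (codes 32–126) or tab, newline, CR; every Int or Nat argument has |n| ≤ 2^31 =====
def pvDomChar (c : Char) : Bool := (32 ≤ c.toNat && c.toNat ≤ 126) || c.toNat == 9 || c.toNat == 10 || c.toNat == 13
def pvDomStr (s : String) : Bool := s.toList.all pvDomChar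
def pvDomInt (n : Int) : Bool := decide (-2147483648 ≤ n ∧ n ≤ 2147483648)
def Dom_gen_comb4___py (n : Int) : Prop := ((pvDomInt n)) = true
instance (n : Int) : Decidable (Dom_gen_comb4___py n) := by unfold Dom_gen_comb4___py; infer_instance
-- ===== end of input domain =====

-- B replaces the fixed four nested loops by one recursive choose(start, k, current)
-- helper generalized over the combination size k (objective: alternative decomposition).

-- ===== PORT A =====
def gen_comb4___py (n : Int) : List (List Int) :=
  (PySem.List.pyRange 0 (n - 3) 1).foldl (fun r i4 =>
    (PySem.List.pyRange (i4 + 1) (n - 2) 1).foldl (fun r i3 =>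
      (PySem.List.pyRange (i3 + 1) (n - 1) 1).foldl (fun r i2 =>
        (PySem.List.pyRange (i2 + 1) n 1).foldl (fun r i1 =>
          r ++ [[i4, i3, i2, i1]]) r) r) r) []

-- ===== PORT B =====
-- the inner 'choose' helper of Source B; 'result' is threaded as an accumulator
def chooseB (n : Int) (start : Int) (k : Nat) (cur : List Int) (result : List (List Int)) :
    List (List Int) :=
  match k with
  | 0 => result ++ [cur]
  | Nat.succ k' =>
    (PySem.List.pyRange start (n - (k' + 1 : Int) + 1) 1).foldl
      (fun res idx => chooseB n (idx + 1) k' (cur ++ [idx]) res) result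

def gen_comb4___py_alt (n : Int) : List (List Int) := chooseB n 0 4 [] []

-- ===== PRECONDITION & SPEC =====
def Spec_gen_comb4___py (n : Int) (out : List (List Int)) : Prop := out = gen_comb4___py_alt n
instance (n : Int) (out : List (List Int)) : Decidable (Spec_gen_comb4___py n out) := by unfold Spec_gen_comb4___py; infer_instance

-- ===== CLAIM (what is proved, stated in full; the proofs are below) =====
def Claim_equal_gen_comb4___py : Prop := ∀ (n : Int), Dom_gen_comb4___py n → Spec_gen_comb4___py n (gen_comb4___py n)

-- ===== LEMMAS AND PROOFS =====

theorem ports_eq (n : Int) : gen_comb4___py n = gen_comb4___py_alt n := by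
  unfold gen_comb4___py gen_comb4___py_alt
  simp only [chooseB]
  norm_num
  simp only [show n - 4 + 1 = n - 3 from by ring, show n - 3 + 1 = n - 2 from by ring,
    show n - 2 + 1 = n - 1 from by ring]

-- ===== VERDICT (by name: the statement is the Claim_ definition above) =====
theorem gen_comb4___py_spec : Claim_equal_gen_comb4___py := by
  intro n _
  unfold Spec_gen_comb4___py
  exact ports_eq n
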